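-- pv_equiv track=rewrite | github.com/djeck1432/amplifer | inst.py | get_rating_posts
-- ===== SOURCE A (Python) =====
-- def get_rating_posts(users_posts, comment_users):
--     rating_post = dict((user, 0) for user in comment_users)
--     for number in users_posts.keys():
--         users = users_posts[number]
--         for user in comment_users:
--             if user in users:
--                 rating_post[user] += 1
--     return rating_post
-- ===== SOURCE B (Python) =====
-- def get_rating_posts(users_posts, comment_users):
--     mult = {}
--     for user in comment_users:
--         mult[user] = mult.get(user, 0) + 1
--     counts = dict((user, 0) for user in comment_users)
--     for users in users_posts.values():
--         for member in set(users):
--             if member in mult: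
--                 counts[member] += mult[member]
--     return counts
-- ===== Notes on version B (the rewrite author's own statement) =====
-- stated objective: faster
-- what changed: Inverts the traversal: instead of scanning comment_users against every post's user list (membership scan per pair), B builds a multiplicity dict of comment_users once and makes a single pass over each post's deduplicated members, accumulating counts[member] += mult[member]; the result dict keeps first-occurrence order via the same 0-initialisation.
import Mathlib
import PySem

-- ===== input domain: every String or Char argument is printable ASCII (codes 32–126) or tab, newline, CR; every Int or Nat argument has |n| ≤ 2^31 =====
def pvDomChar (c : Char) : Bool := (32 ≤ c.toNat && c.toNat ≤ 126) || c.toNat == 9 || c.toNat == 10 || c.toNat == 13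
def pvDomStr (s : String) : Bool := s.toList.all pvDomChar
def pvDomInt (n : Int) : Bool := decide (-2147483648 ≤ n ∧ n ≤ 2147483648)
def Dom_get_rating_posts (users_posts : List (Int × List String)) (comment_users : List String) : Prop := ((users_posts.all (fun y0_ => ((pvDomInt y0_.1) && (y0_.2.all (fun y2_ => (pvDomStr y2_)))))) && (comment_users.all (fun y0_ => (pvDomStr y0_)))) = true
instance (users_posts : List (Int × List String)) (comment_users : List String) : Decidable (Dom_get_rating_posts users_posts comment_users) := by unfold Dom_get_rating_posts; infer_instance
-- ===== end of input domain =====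

-- B inverts the traversal: a multiplicity dict over comment_users plus one pass over each
-- post's deduplicated members replaces A's membership scan of every post for every comment_user.

-- ===== PORT A =====
-- rating_post = dict((user, 0) for user in comment_users); for each post's users,
-- for user in comment_users: if user in users: rating_post[user] += 1
def get_rating_posts (users_posts : List (Int × List String)) (comment_users : List String) : List (String × Int) :=
  let rating0 : PySem.Dict String Int :=
    comment_users.foldl (fun d u => d.insert u 0) PySem.Dict.empty
  let rating :=
    users_posts.foldl (fun d kv =>
      comment_users.foldl (fun d u => if u ∈ kv.2 then d.modify u 0 (fun v => v + 1) else d) d)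
      rating0
  rating.items

-- ===== PORT B =====
-- mult = occurrence counts of comment_users; counts 0-initialised in first-occurrence order;
-- for users in users_posts.values(): for member in set(users): if member in mult: counts[member] += mult[member]
def get_rating_posts_alt (users_posts : List (Int × List String)) (comment_users : List String) : List (String × Int) :=
  let mult : PySem.Dict String Int :=
    comment_users.foldl (fun m u => m.insert u (m.getD u 0 + 1)) PySem.Dict.empty
  let counts0 : PySem.Dict String Int :=
    comment_users.foldl (fun d u => d.insert u 0) PySem.Dict.empty
  let counts :=
    users_posts.foldl (fun c kv =>
      (PySem.Set.ofList kv.2).foldl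
        (fun c m => if mult.contains m then c.modify m 0 (fun v => v + mult.getD m 0) else c) c)
      counts0
  counts.items

-- ===== PRECONDITION & SPEC =====
def Spec_get_rating_posts (users_posts : List (Int × List String)) (comment_users : List String) (out : List (String × Int)) : Prop := out = get_rating_posts_alt users_posts comment_users
instance (users_posts : List (Int × List String)) (comment_users : List String) (out : List (String × Int)) : Decidable (Spec_get_rating_posts users_posts comment_users out) := by unfold Spec_get_rating_posts; infer_instance

-- ===== CLAIM (what is proved, stated in full; the proofs are below) =====
def Claim_equal_get_rating_posts : Prop := ∀ (users_posts : List (Int × List String)) (comment_users : List String), Dom_get_rating_posts users_posts comment_users → Spec_get_rating_posts users_posts comment_users (get_rating_posts users_posts comment_users)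

-- ===== LEMMAS AND PROOFS =====

-- getD through B's inner loop: each occurrence of k adds g k
theorem pv_getD_foldl_modify_add_g (g : String → Int) (l : List String)
    (d : PySem.Dict String Int) (k : String) :
    (l.foldl (fun c m => c.modify m 0 (fun v => v + g m)) d).getD k 0
      = d.getD k 0 + (l.count k : Int) * g k := by
  induction l generalizing d with
  | nil => simp
  | cons m t ih =>
    simp only [List.foldl_cons, ih, PySem.Dict.getD_modify, List.count_cons]
    by_cases h : k = m
    · subst h; simp; ring
    · simp [h]
      exact Or.inl fun hh => h hh.symm

-- keys through B's/A's guarded modify loops do not change when every modified key is present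
theorem pv_keys_foldl_modify (l : List String) (d0 : Int) (f : String → Int → Int)
    (d : PySem.Dict String Int) (h : ∀ m ∈ l, m ∈ d.keys) :
    (l.foldl (fun c m => c.modify m d0 (f m)) d).keys = d.keys := by
  induction l generalizing d with
  | nil => rfl
  | cons m t ih =>
    have hm : m ∈ d.keys := h m (by simp)
    have hk : (d.modify m d0 (f m)).keys = d.keys := by
      rw [PySem.Dict.keys_modify, PySem.Dict.keys_insert_of_contains]
      rw [PySem.Dict.contains_eq_decide_mem_keys]; simpa using hm
    simp only [List.foldl_cons]
    rw [ih _ (by intro x hx; rw [hk]; exact h x (by simp [hx])), hk]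

-- getD through A's whole outer fold
theorem pv_getD_outerA (cus : List String) (ups : List (Int × List String))
    (d : PySem.Dict String Int) (k : String) :
    (ups.foldl (fun d kv =>
        cus.foldl (fun d u => if u ∈ kv.2 then d.modify u 0 (fun v => v + 1) else d) d) d).getD k 0
      = d.getD k 0
        + (ups.map (fun kv => ((cus.filter (fun u => decide (u ∈ kv.2))).count k : Int))).sum := by
  induction ups generalizing d with
  | nil => simp
  | cons kv t ih =>
    simp only [List.foldl_cons, ih, List.map_cons, List.sum_cons]
    rw [PySem.List.foldl_ite_eq_foldl_filter (p := fun u => u ∈ kv.2)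
        (f := fun (d : PySem.Dict String Int) u => d.modify u 0 (fun v => v + 1)),
      PySem.Dict.getD_foldl_modify_add_one]
    ring

-- getD through B's whole outer fold
theorem pv_getD_outerB (mult : PySem.Dict String Int) (ups : List (Int × List String))
    (d : PySem.Dict String Int) (k : String) :
    (ups.foldl (fun c kv =>
        (PySem.Set.ofList kv.2).foldl
          (fun c m => if mult.contains m then c.modify m 0 (fun v => v + mult.getD m 0) else c) c)
        d).getD k 0
      = d.getD k 0
        + (ups.map (fun kv =>
            (((PySem.Set.ofList kv.2).filter (fun m => mult.contains m)).count k : Int)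
              * mult.getD k 0)).sum := by
  induction ups generalizing d with
  | nil => simp
  | cons kv t ih =>
    simp only [List.foldl_cons, ih, List.map_cons, List.sum_cons]
    rw [PySem.List.foldl_if_eq_foldl_filter (fun m => mult.contains m)
        (fun (c : PySem.Dict String Int) m => c.modify m 0 (fun v => v + mult.getD m 0)),
      pv_getD_foldl_modify_add_g (g := fun m => mult.getD m 0)]
    ring

-- keys through A's whole outer fold
theorem pv_keys_outerA (cus : List String) (ups : List (Int × List String))
    (d : PySem.Dict String Int) (h : ∀ u ∈ cus, u ∈ d.keys) :
    (ups.foldl (fun d kv =>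
        cus.foldl (fun d u => if u ∈ kv.2 then d.modify u 0 (fun v => v + 1) else d) d) d).keys
      = d.keys := by
  induction ups generalizing d with
  | nil => rfl
  | cons kv t ih =>
    have hk : (cus.foldl (fun d u => if u ∈ kv.2 then d.modify u 0 (fun v => v + 1) else d) d).keys
        = d.keys := by
      rw [PySem.List.foldl_ite_eq_foldl_filter (p := fun u => u ∈ kv.2)
          (f := fun (d : PySem.Dict String Int) u => d.modify u 0 (fun v => v + 1))]
      exact pv_keys_foldl_modify _ _ (fun u (v : Int) => v + 1) _
        (fun m hm => h m (List.mem_of_mem_filter hm))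
    simp only [List.foldl_cons]
    rw [ih _ (by intro u hu; rw [hk]; exact h u hu), hk]

-- keys through B's whole outer fold (every key passing the guard p is already present)
theorem pv_keys_outerB (mult : PySem.Dict String Int) (ups : List (Int × List String))
    (d : PySem.Dict String Int) (h : ∀ m, mult.contains m = true → m ∈ d.keys) :
    (ups.foldl (fun c kv =>
        (PySem.Set.ofList kv.2).foldl
          (fun c m => if mult.contains m then c.modify m 0 (fun v => v + mult.getD m 0) else c) c)
        d).keys
      = d.keys := by
  induction ups generalizing d with
  | nil => rfl
  | cons kv t ih =>
    have hk : ((PySem.Set.ofList kv.2).foldl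
        (fun c m => if mult.contains m then c.modify m 0 (fun v => v + mult.getD m 0) else c)
        d).keys = d.keys := by
      rw [PySem.List.foldl_if_eq_foldl_filter (fun m => mult.contains m)
          (fun (c : PySem.Dict String Int) m => c.modify m 0 (fun v => v + mult.getD m 0))]
      exact pv_keys_foldl_modify _ _ (fun m v => v + mult.getD m 0) _
        (fun m hm => h m (List.of_mem_filter hm))
    simp only [List.foldl_cons]
    rw [ih _ (by intro m hm; rw [hk]; exact h m hm), hk]

-- the shared 0-initialisation
theorem pv_keys_init (cus : List String) :
    (cus.foldl (fun d u => (d : PySem.Dict String Int).insert u 0) PySem.Dict.empty).keys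
      = PySem.Set.ofList cus := by
  rw [PySem.Dict.keys_foldl_insert cus (fun _ _ => 0) PySem.Dict.empty]
  rfl

theorem pv_getD_foldl_insert_zero (cus : List String) (d : PySem.Dict String Int) (k : String) :
    (cus.foldl (fun d u => (d : PySem.Dict String Int).insert u 0) d).getD k 0
      = if k ∈ cus then 0 else d.getD k 0 := by
  induction cus generalizing d with
  | nil => simp
  | cons u t ih =>
    simp only [List.foldl_cons, ih, PySem.Dict.getD_insert, List.mem_cons]
    by_cases h1 : k ∈ t <;> by_cases h2 : k = u <;> simp [h1, h2]

theorem pv_getD_init (cus : List String) (k : String) :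
    (cus.foldl (fun d u => (d : PySem.Dict String Int).insert u 0) PySem.Dict.empty).getD k 0
      = 0 := by
  rw [pv_getD_foldl_insert_zero]; split <;> simp

-- per-post contribution of key k is the same for both loops (k a comment_user)
theorem pv_term_eq (cus : List String) (k : String) (hk : k ∈ cus) (kv : Int × List String) :
    ((cus.filter (fun u => decide (u ∈ kv.2))).count k : Int)
      = (((PySem.Set.ofList kv.2).filter (fun m => (PySem.Dict.counter cus).contains m)).count k : Int)
          * (PySem.Dict.counter cus).getD k 0 := by
  rw [PySem.Dict.getD_counter]
  have hnd : ((PySem.Set.ofList kv.2).filter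
      (fun m => (PySem.Dict.counter cus).contains m)).Nodup :=
    (PySem.Set.nodup_ofList kv.2).filter _
  by_cases hin : k ∈ kv.2
  · have hmem : k ∈ ((PySem.Set.ofList kv.2).filter
        (fun m => (PySem.Dict.counter cus).contains m)) := by
      rw [List.mem_filter]
      refine ⟨(PySem.Set.mem_ofList _ _).2 hin, ?_⟩
      rw [PySem.Dict.contains_counter]
      simpa using hk
    rw [List.count_eq_one_of_mem hnd hmem, List.count_filter (by simpa using hin)]
    ring
  · have hnmem : k ∉ ((PySem.Set.ofList kv.2).filter
        (fun m => (PySem.Dict.counter cus).contains m)) := by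
      intro h
      exact hin ((PySem.Set.mem_ofList _ _).1 (List.mem_of_mem_filter h))
    have hnmem2 : k ∉ cus.filter (fun u => decide (u ∈ kv.2)) := by
      intro h
      exact hin (by simpa using List.of_mem_filter h)
    rw [List.count_eq_zero_of_not_mem hnmem, List.count_eq_zero_of_not_mem hnmem2]
    ring

-- ===== VERDICT (by name: the statement is the Claim_ definition above) =====
theorem get_rating_posts_spec : Claim_equal_get_rating_posts := by
  intro ups cus _
  unfold Spec_get_rating_posts get_rating_posts get_rating_posts_alt
  simp only [PySem.Dict.foldl_insert_getD_add_one_eq_counter]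
  have hkeys0 : (cus.foldl (fun d u => (d : PySem.Dict String Int).insert u 0)
      PySem.Dict.empty).keys = PySem.Set.ofList cus := pv_keys_init cus
  have hA := pv_keys_outerA cus ups
    (cus.foldl (fun d u => (d : PySem.Dict String Int).insert u 0) PySem.Dict.empty)
    (by intro u hu; rw [hkeys0]; exact (PySem.Set.mem_ofList _ _).2 hu)
  have hB := pv_keys_outerB (PySem.Dict.counter cus) ups
    (cus.foldl (fun d u => (d : PySem.Dict String Int).insert u 0) PySem.Dict.empty)
    (by intro m hm
        rw [hkeys0]
        rw [PySem.Dict.contains_counter] at hm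
        exact (PySem.Set.mem_ofList _ _).2 (by simpa using hm))
  rw [PySem.Dict.items_eq_map_keys _ (by rw [hA, hkeys0]; exact PySem.Set.nodup_ofList cus) 0,
      PySem.Dict.items_eq_map_keys _ (by rw [hB, hkeys0]; exact PySem.Set.nodup_ofList cus) 0]
  rw [hA, hB, hkeys0]
  apply List.map_congr_left
  intro k hkset
  have hk : k ∈ cus := (PySem.Set.mem_ofList _ _).1 hkset
  rw [pv_getD_outerA, pv_getD_outerB, pv_getD_init]
  have hterm : (ups.map (fun kv => ((cus.filter (fun u => decide (u ∈ kv.2))).count k : Int)))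
      = ups.map (fun kv =>
          (((PySem.Set.ofList kv.2).filter
              (fun m => (PySem.Dict.counter cus).contains m)).count k : Int)
            * (PySem.Dict.counter cus).getD k 0) :=
    List.map_congr_left (fun kv _ => pv_term_eq cus k hk kv)
  rw [hterm]
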